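-- pv_equiv track=rewrite | github.com/ciprutdavid/AMNLP_Project | project/finetuning/finetuning_utils.py | find_start_end_indices
-- ===== SOURCE A (Python) =====
-- def find_start_end_indices(context_ids,answer_ids):
--     context_ids = context_ids[:-1] # remove id 1 from the end which the tokenizer adds
--     answer_ids = answer_ids[:-1] # remove id 1 from the end which the tokenizer adds
--     for i in range(len(context_ids) - len(answer_ids) + 1):
--         if context_ids[i:i+len(answer_ids)] == answer_ids:
--             start_index = i
--             end_index = i + len(answer_ids) - 1
--             return start_index,end_index
--     return None
-- ===== SOURCE B (Python) =====
-- def find_start_end_indices(context_ids, answer_ids):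
--     c = context_ids[:-1]  # remove id 1 from the end which the tokenizer adds
--     a = answer_ids[:-1]
--     n = len(c)
--     m = len(a)
--     if m == 0:
--         return (0, -1)
--     if n < m:
--         return None
--     MOD = 1000000007
--     BASE = 1000003
--     pw = pow(BASE, m - 1, MOD)
--     ha = 0
--     for x in a:
--         ha = (ha * BASE + x) % MOD
--     h = 0
--     for x in c[:m]:
--         h = (h * BASE + x) % MOD
--     i = 0
--     while True:
--         if h == ha and c[i:i + m] == a:
--             return (i, i + m - 1)
--         if i == n - m:
--             return None
--         h = ((h - c[i] * pw) * BASE + c[i + m]) % MOD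
--         i += 1
-- ===== Notes on version B (the rewrite author's own statement) =====
-- stated objective: alternative
-- what changed: Replaced the naive slice-and-compare scan over all start positions with Rabin-Karp rolling-hash search (full window comparison only on a hash hit), which stays exact; it trades A's O(m)-per-position slice copies for O(1) hash updates per position.
import Mathlib
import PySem

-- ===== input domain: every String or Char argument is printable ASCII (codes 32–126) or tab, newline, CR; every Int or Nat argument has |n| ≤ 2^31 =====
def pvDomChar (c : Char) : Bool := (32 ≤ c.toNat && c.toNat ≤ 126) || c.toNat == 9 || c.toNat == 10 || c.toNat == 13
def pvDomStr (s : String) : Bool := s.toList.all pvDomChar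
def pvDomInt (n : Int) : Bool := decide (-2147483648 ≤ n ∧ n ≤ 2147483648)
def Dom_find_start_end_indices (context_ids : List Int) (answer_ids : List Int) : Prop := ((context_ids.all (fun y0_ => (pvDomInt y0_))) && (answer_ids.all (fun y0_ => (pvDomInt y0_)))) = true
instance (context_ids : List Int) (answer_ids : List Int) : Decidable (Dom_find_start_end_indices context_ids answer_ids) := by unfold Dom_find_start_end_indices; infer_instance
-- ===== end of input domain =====

-- B replaces A's slice-and-compare scan with Rabin–Karp rolling-hash search:
-- it compares the window in full only on a hash hit (a different algorithm, same exact result).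

-- ===== PORT A =====
-- the 'for i in range(...): if context_ids[i:i+len(answer_ids)] == answer_ids: return ...' loop
def pvScanA (c a : List Int) : List Int → Option (Int × Int)
  | [] => none
  | i :: rest =>
    if PySem.List.slice c (some i) (some (i + (a.length : Int))) = a then
      some (i, i + (a.length : Int) - 1)
    else pvScanA c a rest

def find_start_end_indices (context_ids : List Int) (answer_ids : List Int) : Option (Int × Int) :=
  let c := PySem.List.slice context_ids none (some (-1))
  let a := PySem.List.slice answer_ids none (some (-1))
  pvScanA c a (PySem.List.pyRange 0 ((c.length : Int) - (a.length : Int) + 1) 1)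

-- ===== PORT B =====
-- 'for x in l: h = (h*BASE + x) % MOD'
def pvH (l : List Int) : Int :=
  l.foldl (fun h x => (h * 1000003 + x) % 1000000007) 0

-- the 'while True' loop of Source B; fuel k = n - m - i counts the remaining shifts
def pvRkLoop (c a : List Int) (m : Nat) (ha pw : Int) : Nat → Int → Int → Option (Int × Int)
  | k, i, h =>
    if h = ha ∧ PySem.List.slice c (some i) (some (i + (m : Int))) = a then
      some (i, i + (m : Int) - 1)
    else
      match k with
      | 0 => none
      | k' + 1 =>
        pvRkLoop c a m ha pw k' (i + 1)
          (((h - (PySem.List.pyGetD c i 0) * pw) * 1000003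
              + PySem.List.pyGetD c (i + (m : Int)) 0) % 1000000007)

def find_start_end_indices_alt (context_ids : List Int) (answer_ids : List Int) : Option (Int × Int) :=
  let c := PySem.List.slice context_ids none (some (-1))
  let a := PySem.List.slice answer_ids none (some (-1))
  let n := c.length
  let m := a.length
  if m = 0 then some (0, -1)
  else if n < m then none
  else
    let ha := pvH a
    let h := pvH (PySem.List.slice c none (some (m : Int)))
    let pw := ((1000003 : Int) ^ (m - 1)) % 1000000007
    pvRkLoop c a m ha pw (n - m) 0 h

-- ===== PRECONDITION & SPEC =====
def Spec_find_start_end_indices (context_ids : List Int) (answer_ids : List Int) (out : Option (Int × Int)) : Prop := out = find_start_end_indices_alt context_ids answer_ids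
instance (context_ids : List Int) (answer_ids : List Int) (out : Option (Int × Int)) : Decidable (Spec_find_start_end_indices context_ids answer_ids out) := by unfold Spec_find_start_end_indices; infer_instance

-- ===== CLAIM (what is proved, stated in full; the proofs are below) =====
def Claim_equal_find_start_end_indices : Prop := ∀ (context_ids : List Int) (answer_ids : List Int), Dom_find_start_end_indices context_ids answer_ids → Spec_find_start_end_indices context_ids answer_ids (find_start_end_indices context_ids answer_ids)

-- ===== LEMMAS AND PROOFS =====

-- exact (unreduced) polynomial hash
def pvP (l : List Int) : Int := l.foldl (fun h x => h * 1000003 + x) 0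

lemma pvP_shift (l : List Int) : ∀ h : Int,
    l.foldl (fun h x => h * 1000003 + x) h = h * 1000003 ^ l.length + pvP l := by
  induction l with
  | nil => intro h; simp [pvP]
  | cons x t ih =>
    intro h
    simp only [List.foldl_cons, List.length_cons, pvP, zero_mul, zero_add]
    rw [ih (h * 1000003 + x), ih x]
    ring

lemma pvH_eq_mod (l : List Int) : pvH l = pvP l % 1000000007 := by
  suffices h : ∀ h0 : Int,
      l.foldl (fun h x => (h * 1000003 + x) % 1000000007) (h0 % 1000000007)
        = (l.foldl (fun h x => h * 1000003 + x) h0) % 1000000007 by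
    have := h 0; simpa [pvH, pvP] using this
  induction l with
  | nil => intro h0; simp
  | cons x t ih =>
    intro h0
    simp only [List.foldl_cons]
    have : (h0 % 1000000007 * 1000003 + x) % 1000000007
        = (h0 * 1000003 + x) % 1000000007 := by
      conv_rhs => rw [Int.add_emod, Int.mul_emod]
      rw [Int.add_emod, Int.mul_emod, Int.emod_emod_of_dvd _ dvd_rfl]
    rw [this, ← ih (h0 * 1000003 + x)]

lemma pvP_append_singleton (t : List Int) (y : Int) :
    pvP (t ++ [y]) = pvP t * 1000003 + y := by
  simp [pvP, List.foldl_append]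

lemma pvP_cons (x : Int) (t : List Int) :
    pvP (x :: t) = x * 1000003 ^ t.length + pvP t := by
  simp only [pvP, List.foldl_cons, zero_mul, zero_add]
  exact pvP_shift t x

-- the rolling-hash update is exact modulo 1000000007
lemma pvH_roll (x y : Int) (t : List Int) :
    ((pvH (x :: t) - x * ((1000003 : Int) ^ t.length % 1000000007)) * 1000003 + y)
        % 1000000007 = pvH (t ++ [y]) := by
  rw [pvH_eq_mod, pvH_eq_mod, pvP_append_singleton]
  have h1 : pvP (x :: t) % 1000000007 ≡ pvP (x :: t) [ZMOD 1000000007] :=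
    Int.emod_emod_of_dvd _ dvd_rfl
  have h2 : (1000003 : Int) ^ t.length % 1000000007 ≡ (1000003 : Int) ^ t.length
      [ZMOD 1000000007] := Int.emod_emod_of_dvd _ dvd_rfl
  have h3 : (pvP (x :: t) % 1000000007 - x * ((1000003 : Int) ^ t.length % 1000000007))
        * 1000003 + y
      ≡ (pvP (x :: t) - x * (1000003 : Int) ^ t.length) * 1000003 + y
      [ZMOD 1000000007] :=
    Int.ModEq.add_right y (Int.ModEq.mul_right _ (h1.sub (Int.ModEq.mul_left x h2)))
  calc ((pvP (x :: t) % 1000000007 - x * ((1000003 : Int) ^ t.length % 1000000007))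
          * 1000003 + y) % 1000000007
      = ((pvP (x :: t) - x * (1000003 : Int) ^ t.length) * 1000003 + y) % 1000000007 := h3
    _ = (pvP t * 1000003 + y) % 1000000007 := by rw [pvP_cons]; ring_nf

-- the window at position j
def pvW (c : List Int) (m j : Nat) : List Int := (c.drop j).take m

lemma pvW_cons (c : List Int) (m j : Nat) (hm : 1 ≤ m) (hj : j < c.length) :
    pvW c m j = c.getD j 0 :: (c.drop (j + 1)).take (m - 1) := by
  obtain ⟨m', rfl⟩ : ∃ m', m = m' + 1 := ⟨m - 1, by omega⟩
  unfold pvW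
  simp only [Nat.add_sub_cancel]
  rw [List.drop_eq_getElem_cons hj, List.getD_eq_getElem c 0 hj, List.take_succ_cons]

lemma pvW_snoc (c : List Int) (m j : Nat) (hm : 1 ≤ m) (hjm : j + m < c.length) :
    pvW c m (j + 1) = (c.drop (j + 1)).take (m - 1) ++ [c.getD (j + m) 0] := by
  obtain ⟨m', rfl⟩ : ∃ m', m = m' + 1 := ⟨m - 1, by omega⟩
  unfold pvW
  simp only [Nat.add_sub_cancel]
  rw [List.getD_eq_getElem c 0 hjm, List.take_add_one]
  congr 1
  · rw [List.getElem?_drop, show j + 1 + m' = j + (m' + 1) from by omega,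
      List.getElem?_eq_getElem hjm]
    rfl

-- A's slice check is the window
lemma slice_window (c : List Int) (m j : Nat) :
    PySem.List.slice c (some (j : Int)) (some ((j : Int) + (m : Int))) = pvW c m j := by
  unfold pvW
  exact PySem.List.slice_natCast_add c j m

-- main loop correspondence, for 1 ≤ m ≤ n
lemma loop_eq (c a : List Int) (hm : 1 ≤ a.length) :
    ∀ (k j : Nat), j + a.length ≤ c.length → k = c.length - a.length - j →
    pvRkLoop c a a.length (pvH a) ((1000003 : Int) ^ (a.length - 1) % 1000000007)
        k (j : Int) (pvH (pvW c a.length j))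
      = pvScanA c a
          (PySem.List.pyRange (j : Int) ((c.length : Int) - (a.length : Int) + 1) 1) := by
  intro k
  induction k with
  | zero =>
    intro j hjm hk
    have hrange : PySem.List.pyRange (j : Int) ((c.length : Int) - (a.length : Int) + 1) 1
        = [(j : Int)] := by
      have h : ((c.length : Int) - (a.length : Int) + 1) = (j : Int) + 1 := by omega
      rw [h]
      exact PySem.List.pyRange_one_singleton _
    rw [hrange, pvRkLoop]
    simp only [pvScanA, slice_window]
    by_cases hcond : pvW c a.length j = a
    · rw [if_pos ⟨congrArg pvH hcond, hcond⟩, if_pos hcond]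
    · rw [if_neg (fun h => hcond h.2), if_neg hcond]
  | succ k' ih =>
    intro j hjm hk
    have hjlt : j + a.length < c.length := by omega
    have hjn : j < c.length := by omega
    have hrange : PySem.List.pyRange (j : Int) ((c.length : Int) - (a.length : Int) + 1) 1
        = (j : Int)
          :: PySem.List.pyRange ((j : Int) + 1) ((c.length : Int) - (a.length : Int) + 1) 1 :=
      PySem.List.pyRange_one_cons (by omega)
    rw [hrange, pvRkLoop]
    simp only [pvScanA, slice_window]
    by_cases hcond : pvW c a.length j = a
    · rw [if_pos ⟨congrArg pvH hcond, hcond⟩, if_pos hcond]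
    · rw [if_neg (fun h => hcond h.2), if_neg hcond]
      have hg1 : PySem.List.pyGetD c (j : Int) 0 = c.getD j 0 :=
        PySem.List.pyGetD_natCast c j 0
      have hg2 : PySem.List.pyGetD c ((j : Int) + (a.length : Int)) 0 = c.getD (j + a.length) 0 := by
        have h : ((j : Int) + (a.length : Int)) = ((j + a.length : Nat) : Int) := by push_cast; ring
        rw [h]
        exact PySem.List.pyGetD_natCast c (j + a.length) 0
      have hupd : ((pvH (pvW c a.length j) - PySem.List.pyGetD c (j : Int) 0
            * ((1000003 : Int) ^ (a.length - 1) % 1000000007)) * 1000003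
            + PySem.List.pyGetD c ((j : Int) + (a.length : Int)) 0) % 1000000007
          = pvH (pvW c a.length (j + 1)) := by
        rw [hg1, hg2, pvW_cons c a.length j hm hjn, pvW_snoc c a.length j hm hjlt]
        set t := (c.drop (j + 1)).take (a.length - 1) with htdef
        have hlen : t.length = a.length - 1 := by
          rw [htdef, List.length_take, List.length_drop]
          omega
        rw [← hlen]
        exact pvH_roll (c.getD j 0) (c.getD (j + a.length) 0) t
      rw [hupd]
      have hcast : ((j : Int) + 1) = (((j + 1 : Nat)) : Int) := by push_cast; ring
      rw [hcast]
      exact ih (j + 1) (by omega) (by omega)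

-- the two full programs agree for every pair of lists (no Dom needed)
lemma core (c a : List Int) :
    pvScanA c a (PySem.List.pyRange 0 ((c.length : Int) - (a.length : Int) + 1) 1)
      = (if a.length = 0 then some ((0 : Int), (-1 : Int))
         else if c.length < a.length then none
         else pvRkLoop c a a.length (pvH a)
            ((1000003 : Int) ^ (a.length - 1) % 1000000007)
            (c.length - a.length) 0
            (pvH (PySem.List.slice c none (some (a.length : Int))))) := by
  by_cases hm0 : a.length = 0
  · have ha : a = [] := List.eq_nil_of_length_eq_zero hm0
    subst ha
    simp only [List.length_nil, Nat.cast_zero, reduceIte]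
    have hrange : PySem.List.pyRange 0 ((c.length : Int) - 0 + 1) 1
        = 0 :: PySem.List.pyRange 1 ((c.length : Int) - 0 + 1) 1 :=
      PySem.List.pyRange_one_cons (by omega)
    rw [hrange]
    simp [pvScanA, PySem.List.slice_zero_start, PySem.List.slice_to]
  · rw [if_neg hm0]
    by_cases hnm : c.length < a.length
    · have hrange : PySem.List.pyRange 0 ((c.length : Int) - (a.length : Int) + 1) 1
          = [] := PySem.List.pyRange_one_eq_nil (by omega)
      rw [hrange, if_pos hnm]
      simp [pvScanA]
    · rw [if_neg hnm]
      have hm : 1 ≤ a.length := by omega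
      have hinit : PySem.List.slice c none (some ((a.length : Int)))
          = pvW c a.length 0 := by
        rw [PySem.List.slice_to_natCast]
        simp [pvW]
      rw [hinit]
      have h := loop_eq c a hm (c.length - a.length) 0 (by omega) (by omega)
      simpa using h.symm

-- ===== VERDICT (by name: the statement is the Claim_ definition above) =====
theorem find_start_end_indices_spec : Claim_equal_find_start_end_indices := by
  intro context_ids answer_ids _
  unfold Spec_find_start_end_indices find_start_end_indices find_start_end_indices_alt
  exact core _ _
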